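-- pv_equiv track=rewrite | github.com/maconesally-eng/yota-analytics | tools/detect_outliers.py | detect_formats
-- ===== SOURCE A (Python) =====
-- FORMAT_PATTERNS = {
--     'Q&A': ['q&a', 'questions', 'answers', 'ask me', 'ama'],
--     'Vlog': ['vlog', 'day in', 'daily', 'life', 'routine'],
--     'Challenge': ['challenge', 'try', 'trying', 'attempt', 'vs'],
--     'Tutorial': ['how to', 'tutorial', 'guide', 'tips', 'learn'],
--     'Storytime': ['storytime', 'story', 'happened', 'time i', 'time we'],
--     'Announcement': ['announcement', 'news', 'update', 'reveal', 'surprise'],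
--     'Reaction': ['reaction', 'react', 'reacting', 'respond'],
--     'Review': ['review', 'unboxing', 'haul', 'first impression']
-- }
--
-- def detect_formats(titles: list[str]) -> list[str]:
--     """
--     Detect common formats in titles.
--
--     Args:
--         titles: List of video titles
--
--     Returns:
--         List of detected format names
--     """
--     detected = []
--
--     for format_name, keywords in FORMAT_PATTERNS.items():
--         # Check if any title contains format keywords
--         for title in titles:
--             title_lower = title.lower()
--             if any(kw in title_lower for kw in keywords):
--                 detected.append(format_name)
--                 break  # Only count format once
--
--     return detected
-- ===== SOURCE B (Python) =====
-- FORMAT_PATTERNS = {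
--     'Q&A': ['q&a', 'questions', 'answers', 'ask me', 'ama'],
--     'Vlog': ['vlog', 'day in', 'daily', 'life', 'routine'],
--     'Challenge': ['challenge', 'try', 'trying', 'attempt', 'vs'],
--     'Tutorial': ['how to', 'tutorial', 'guide', 'tips', 'learn'],
--     'Storytime': ['storytime', 'story', 'happened', 'time i', 'time we'],
--     'Announcement': ['announcement', 'news', 'update', 'reveal', 'surprise'],
--     'Reaction': ['reaction', 'react', 'reacting', 'respond'],
--     'Review': ['review', 'unboxing', 'haul', 'first impression']
-- }
--
-- def detect_formats(titles: list[str]) -> list[str]: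
--     """One pass over titles: lower each title once, collect matching format
--     names into a set, then emit them in FORMAT_PATTERNS order."""
--     found = set()
--     for title in titles:
--         title_lower = title.lower()
--         for format_name, keywords in FORMAT_PATTERNS.items():
--             if format_name not in found and any(kw in title_lower for kw in keywords):
--                 found.add(format_name)
--     return [name for name in FORMAT_PATTERNS if name in found]
-- ===== Notes on version B (the rewrite author's own statement) =====
-- stated objective: alternative
-- what changed: Loop order inverted: one pass over titles (each title lowered exactly once) accumulating matched format names in a set, with the result rebuilt afterwards in FORMAT_PATTERNS order, instead of re-scanning and re-lowering all titles once per format.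
import Mathlib
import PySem

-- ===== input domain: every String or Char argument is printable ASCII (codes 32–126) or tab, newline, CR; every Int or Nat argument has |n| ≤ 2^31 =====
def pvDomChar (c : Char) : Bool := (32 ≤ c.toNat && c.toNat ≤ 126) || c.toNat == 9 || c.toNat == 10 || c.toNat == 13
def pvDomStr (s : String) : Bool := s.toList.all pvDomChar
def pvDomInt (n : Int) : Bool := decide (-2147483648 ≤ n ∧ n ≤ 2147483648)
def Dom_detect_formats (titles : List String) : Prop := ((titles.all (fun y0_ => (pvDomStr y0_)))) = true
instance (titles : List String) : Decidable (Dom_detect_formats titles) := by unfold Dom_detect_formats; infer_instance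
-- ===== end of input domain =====

-- B inverts the loop order: one pass over titles (lowering each title once) collecting
-- matched format names into a set, then rebuilding the result in FORMAT_PATTERNS order.


-- FORMAT_PATTERNS: a module-level dict, ported as an association list in insertion order
def formatPatterns : List (String × List String) :=
  [("Q&A", ["q&a", "questions", "answers", "ask me", "ama"]),
   ("Vlog", ["vlog", "day in", "daily", "life", "routine"]),
   ("Challenge", ["challenge", "try", "trying", "attempt", "vs"]),
   ("Tutorial", ["how to", "tutorial", "guide", "tips", "learn"]),
   ("Storytime", ["storytime", "story", "happened", "time i", "time we"]),
   ("Announcement", ["announcement", "news", "update", "reveal", "surprise"]),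
   ("Reaction", ["reaction", "react", "reacting", "respond"]),
   ("Review", ["review", "unboxing", "haul", "first impression"])]

-- ===== PORT A =====
-- inner 'for title in titles: … break' loop of A: true iff it appends (first matching title)
def detect_formats_inner (keywords : List String) : List String → Bool
  | [] => false
  | title :: rest =>
      let title_lower := PySem.Str.lower title
      if keywords.any (fun kw => PySem.Str.isIn kw title_lower) then true
      else detect_formats_inner keywords rest

def detect_formats (titles : List String) : List String :=
  formatPatterns.foldl (fun detected p =>
    if detect_formats_inner p.2 titles then detected ++ [p.1] else detected) []

-- ===== PORT B =====
-- the single pass over titles, accumulating the set of matched format names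
def detect_formats_alt_scan (titles : List String) : PySem.Set String :=
  titles.foldl (fun found title =>
    let title_lower := PySem.Str.lower title
    formatPatterns.foldl (fun f p =>
      if !(PySem.Set.contains f p.1) && p.2.any (fun kw => PySem.Str.isIn kw title_lower)
      then PySem.Set.add f p.1 else f) found) PySem.Set.empty

def detect_formats_alt (titles : List String) : List String :=
  (formatPatterns.map Prod.fst).filter
    (fun name => PySem.Set.contains (detect_formats_alt_scan titles) name)

-- ===== PRECONDITION & SPEC =====
def Spec_detect_formats (titles : List String) (out : List String) : Prop := out = detect_formats_alt titles
instance (titles : List String) (out : List String) : Decidable (Spec_detect_formats titles out) := by unfold Spec_detect_formats; infer_instance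

-- ===== CLAIM (what is proved, stated in full; the proofs are below) =====
def Claim_equal_detect_formats : Prop := ∀ (titles : List String), Dom_detect_formats titles → Spec_detect_formats titles (detect_formats titles)

-- ===== LEMMAS AND PROOFS =====

-- A's inner loop finds a matching title iff one exists
theorem inner_eq_any (kws : List String) (titles : List String) :
    detect_formats_inner kws titles
      = titles.any (fun t => kws.any (fun kw => PySem.Str.isIn kw (PySem.Str.lower t))) := by
  induction titles with
  | nil => rfl
  | cons t ts ih =>
      simp only [detect_formats_inner, List.any_cons, ih]
      split <;> simp_all

-- membership after B's inner fold over the patterns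
theorem mem_inner_fold (pats : List (String × List String)) (tl : String)
    (f : PySem.Set String) (x : String) :
    x ∈ pats.foldl (fun f p =>
        if !(PySem.Set.contains f p.1) && p.2.any (fun kw => PySem.Str.isIn kw tl)
        then PySem.Set.add f p.1 else f) f
      ↔ x ∈ f ∨ ∃ p ∈ pats, p.1 = x ∧ p.2.any (fun kw => PySem.Str.isIn kw tl) := by
  induction pats generalizing f with
  | nil => simp
  | cons p ps ih =>
      simp only [List.foldl_cons]
      rw [ih]
      by_cases hm : (p.2.any fun kw => PySem.Str.isIn kw tl) = true <;>
        by_cases hc : PySem.Set.contains f p.1 = true <;>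
        simp only [hm, hc, Bool.not_true, Bool.not_false, Bool.and_false, Bool.and_true, if_true, if_false, Bool.false_eq_true,
          PySem.Set.mem_add, List.mem_cons]
      · rw [PySem.Set.contains_iff] at hc
        constructor
        · rintro (h | ⟨q, hq, h1, h2⟩)
          · exact Or.inl h
          · exact Or.inr ⟨q, Or.inr hq, h1, h2⟩
        · rintro (h | ⟨q, hq | hq, h1, h2⟩)
          · exact Or.inl h
          · subst hq; exact Or.inl (h1 ▸ hc)
          · exact Or.inr ⟨q, hq, h1, h2⟩
      · constructor
        · rintro ((h | h) | ⟨q, hq, h1, h2⟩)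
          · exact Or.inl h
          · exact Or.inr ⟨p, Or.inl rfl, h.symm, hm⟩
          · exact Or.inr ⟨q, Or.inr hq, h1, h2⟩
        · rintro (h | ⟨q, hq | hq, h1, h2⟩)
          · exact Or.inl (Or.inl h)
          · subst hq; exact Or.inl (Or.inr h1.symm)
          · exact Or.inr ⟨q, hq, h1, h2⟩
      all_goals
        constructor
        · rintro (h | ⟨q, hq, h1, h2⟩)
          · exact Or.inl h
          · exact Or.inr ⟨q, Or.inr hq, h1, h2⟩
        · rintro (h | ⟨q, hq | hq, h1, h2⟩)
          · exact Or.inl h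
          · subst hq; exact absurd h2 hm
          · exact Or.inr ⟨q, hq, h1, h2⟩

-- membership in B's scan result
theorem mem_scan (titles : List String) (f : PySem.Set String) (x : String) :
    x ∈ titles.foldl (fun found title =>
        formatPatterns.foldl (fun f p =>
          if !(PySem.Set.contains f p.1) && p.2.any (fun kw => PySem.Str.isIn kw (PySem.Str.lower title))
          then PySem.Set.add f p.1 else f) found) f
      ↔ x ∈ f ∨ ∃ t ∈ titles, ∃ p ∈ formatPatterns, p.1 = x ∧
            p.2.any (fun kw => PySem.Str.isIn kw (PySem.Str.lower t)) := by
  induction titles generalizing f with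
  | nil => simp
  | cons t ts ih =>
      simp only [List.foldl_cons, ih, mem_inner_fold, List.mem_cons]
      constructor
      · rintro ((h | ⟨p, hp, h1, h2⟩) | ⟨u, hu, hrest⟩)
        · exact Or.inl h
        · exact Or.inr ⟨t, Or.inl rfl, p, hp, h1, h2⟩
        · exact Or.inr ⟨u, Or.inr hu, hrest⟩
      · rintro (h | ⟨u, hu | hu, hrest⟩)
        · exact Or.inl (Or.inl h)
        · subst hu; exact Or.inl (Or.inr hrest)
        · exact Or.inr ⟨u, hu, hrest⟩

-- the names in FORMAT_PATTERNS are pairwise distinct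
theorem names_inj : ∀ p ∈ formatPatterns, ∀ q ∈ formatPatterns, p.1 = q.1 → p = q := by
  decide

-- for each pattern, A's per-format condition agrees with membership in B's found set
theorem cond_agree (titles : List String) (p : String × List String) (hp : p ∈ formatPatterns) :
    detect_formats_inner p.2 titles
      = PySem.Set.contains (detect_formats_alt_scan titles) p.1 := by
  rw [inner_eq_any]
  rw [Bool.eq_iff_iff, PySem.Set.contains_iff]
  unfold detect_formats_alt_scan
  rw [mem_scan]
  simp only [PySem.Set.empty, List.not_mem_nil, false_or, List.any_eq_true]
  constructor
  · rintro ⟨t, ht, hm⟩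
    exact ⟨t, ht, p, hp, rfl, hm⟩
  · rintro ⟨t, ht, q, hq, h1, h2⟩
    have := names_inj q hq p hp h1
    subst this
    exact ⟨t, ht, h2⟩

-- ===== VERDICT (by name: the statement is the Claim_ definition above) =====
theorem detect_formats_spec : Claim_equal_detect_formats := by
  intro titles _
  unfold Spec_detect_formats detect_formats detect_formats_alt
  rw [PySem.List.foldl_append_if]
  rw [List.filter_map]
  simp only [List.nil_append]
  congr 1
  apply List.filter_congr
  intro p hp
  exact cond_agree titles p hp
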